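-- pv_equiv track=rewrite | github.com/back1ash/solving_problem | coding_test/programmers/성격 유형 검사하기.py | solution
-- ===== SOURCE A (Python) =====
-- def solution(survey, choices):
--     answer = ''
--
--     score = {'R': 0, 'T': 0,
--             'C': 0, 'F': 0,
--             'J': 0, 'M': 0,
--             'A': 0, 'N': 0}
--     for character, choice in zip(survey, choices):
--         disagree = character[0]
--         agree = character[1]
--         if choice < 4:
--             score[disagree] += 4-choice
--         if choice > 4:
--             score[agree] += choice-4
--
--     first = 'R' if score['R'] >= score['T'] else 'T'
--     second = 'C' if score['C'] >= score['F'] else 'F'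
--     third = 'J' if score['J'] >= score['M'] else 'M'
--     fourth = 'A' if score['A'] >= score['N'] else 'N'
--
--     return ''.join([first,second,third,fourth])
-- ===== SOURCE B (Python) =====
-- def solution(survey, choices):
--     def score(letter):
--         return sum(abs(c - 4) for s, c in zip(survey, choices)
--                    if (c < 4 and s[0] == letter) or (c > 4 and s[1] == letter))
--     return ''.join(a if score(a) >= score(b) else b
--                    for a, b in [('R', 'T'), ('C', 'F'), ('J', 'M'), ('A', 'N')])
-- ===== Notes on version B (the rewrite author's own statement) =====
-- stated objective: simpler
-- what changed: B replaces A's single pass that mutates eight dict counters by a pure functional decomposition: a per-letter score computed as a filtered sum over zip(survey, choices) (eight staged passes, no mutable state), with the answer built by a comprehension over the four letter pairs.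
import Mathlib
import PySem

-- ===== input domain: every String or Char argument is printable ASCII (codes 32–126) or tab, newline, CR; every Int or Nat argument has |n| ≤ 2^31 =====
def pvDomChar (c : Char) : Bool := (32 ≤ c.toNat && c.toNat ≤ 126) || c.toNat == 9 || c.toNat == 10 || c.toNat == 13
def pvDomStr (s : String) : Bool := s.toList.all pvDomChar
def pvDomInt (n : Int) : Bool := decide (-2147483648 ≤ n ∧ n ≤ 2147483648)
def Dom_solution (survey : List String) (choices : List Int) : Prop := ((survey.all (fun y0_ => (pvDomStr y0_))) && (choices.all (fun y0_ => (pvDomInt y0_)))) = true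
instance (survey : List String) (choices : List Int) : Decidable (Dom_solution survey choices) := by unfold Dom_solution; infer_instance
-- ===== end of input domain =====

-- B replaces A's single pass that mutates eight dict counters by eight pure
-- per-letter filtered sums (staged passes) and a comprehension over the four
-- letter pairs; return values agree wherever A returns (objective: simpler).

-- ===== PORT A =====
def solutionScore0 : PySem.Dict Char Int :=
  PySem.Dict.mk [('R',0),('T',0),('C',0),('F',0),('J',0),('M',0),('A',0),('N',0)]

-- one iteration of A's loop; `none` = the Python raised (IndexError/KeyError)
def solutionStep (sc? : Option (PySem.Dict Char Int)) (p : String × Int) :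
    Option (PySem.Dict Char Int) :=
  match sc? with
  | none => none
  | some sc =>
    match PySem.Str.pyGet? p.1 0, PySem.Str.pyGet? p.1 1 with
    | some disagree, some agree =>
      let sc1? : Option (PySem.Dict Char Int) :=
        if p.2 < 4 then
          match sc.get? disagree with
          | some v => some (sc.insert disagree (v + (4 - p.2)))
          | none => none
        else some sc
      match sc1? with
      | none => none
      | some sc1 =>
        if p.2 > 4 then
          match sc1.get? agree with
          | some v => some (sc1.insert agree (v + (p.2 - 4)))
          | none => none
        else some sc1
    | _, _ => none

def solution (survey : List String) (choices : List Int) : String :=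
  match (List.zip survey choices).foldl solutionStep (some solutionScore0) with
  | none => ""   -- unreachable under Pre_solution: the Python raised
  | some sc =>
    -- the eight keys are always present, so getD is exact for Python's score[...]
    let first  := if sc.getD 'R' 0 ≥ sc.getD 'T' 0 then 'R' else 'T'
    let second := if sc.getD 'C' 0 ≥ sc.getD 'F' 0 then 'C' else 'F'
    let third  := if sc.getD 'J' 0 ≥ sc.getD 'M' 0 then 'J' else 'M'
    let fourth := if sc.getD 'A' 0 ≥ sc.getD 'N' 0 then 'A' else 'N'
    String.mk [first, second, third, fourth]

-- ===== PORT B =====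
-- one step of Source B's generator inside sum(...) for a fixed letter; the boolean
-- condition keeps Python's short-circuit order: s[1] is only read when c > 4
-- and c < 4 failed; `none` = Source B raised (IndexError)
def altScoreStep (letter : Char) (acc? : Option Int) (p : String × Int) : Option Int :=
  match acc? with
  | none => none
  | some acc =>
    if p.2 < 4 then
      match PySem.Str.pyGet? p.1 0 with
      | none => none
      | some d => if d == letter then some (acc + |p.2 - 4|) else some acc
    else if p.2 > 4 then
      match PySem.Str.pyGet? p.1 1 with
      | none => none
      | some a => if a == letter then some (acc + |p.2 - 4|) else some acc
    else some acc

-- Source B's score(letter)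
def altScore (survey : List String) (choices : List Int) (letter : Char) : Option Int :=
  (List.zip survey choices).foldl (altScoreStep letter) (some 0)

-- one element of Source B's final comprehension
def altPick (survey : List String) (choices : List Int) (p : Char × Char) : Char :=
  match altScore survey choices p.1, altScore survey choices p.2 with
  | some sa, some sb => if sa ≥ sb then p.1 else p.2
  | _, _ => ' '   -- unreachable under Pre_solution: Source B raised

def solution_alt (survey : List String) (choices : List Int) : String :=
  String.mk (([('R','T'),('C','F'),('J','M'),('A','N')]).map (altPick survey choices))

-- ===== PRECONDITION & SPEC =====
def pvLetters : List Char := ['R', 'T', 'C', 'F', 'J', 'M', 'A', 'N']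

-- exactly the inputs on which A returns: every paired survey string has ≥ 2 chars
-- (A reads s[0] and s[1] unconditionally) and the char actually looked up in the
-- score dict is one of the eight type letters
def Pre_solution (survey : List String) (choices : List Int) : Prop :=
  ∀ p ∈ List.zip survey choices,
    2 ≤ p.1.toList.length ∧
    (p.2 < 4 → p.1.toList.getD 0 ' ' ∈ pvLetters) ∧
    (p.2 > 4 → p.1.toList.getD 1 ' ' ∈ pvLetters)
instance (survey : List String) (choices : List Int) : Decidable (Pre_solution survey choices) := by unfold Pre_solution; infer_instance

def pvWitness_solution : List String × List Int := (["TR", "CF", "JM", "AN"], [1, 5, 4, 7])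

def Spec_solution (survey : List String) (choices : List Int) (out : String) : Prop := out = solution_alt survey choices
instance (survey : List String) (choices : List Int) (out : String) : Decidable (Spec_solution survey choices out) := by unfold Spec_solution; infer_instance

-- ===== CLAIM (what is proved, stated in full; the proofs are below) =====
def Claim_equal_solution : Prop := ∀ (survey : List String) (choices : List Int), Dom_solution survey choices → Pre_solution survey choices → Spec_solution survey choices (solution survey choices)

-- ===== LEMMAS AND PROOFS =====

-- per-item contribution of one zipped pair to letter L's score
def pvDelta (L : Char) (p : String × Int) : Int :=
  if p.2 < 4 ∧ p.1.toList.getD 0 ' ' = L then 4 - p.2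
  else if p.2 > 4 ∧ p.1.toList.getD 1 ' ' = L then p.2 - 4
  else 0

-- total contribution of a list of zipped pairs to letter L's score
def pvNet (L : Char) : List (String × Int) → Int
  | [] => 0
  | p :: l => pvDelta L p + pvNet L l

def mkScore (r t c f j m a n : Int) : PySem.Dict Char Int :=
  PySem.Dict.mk [('R',r),('T',t),('C',c),('F',f),('J',j),('M',m),('A',a),('N',n)]

theorem stepB (L a b : Char) (rest : List Char) (s : String) (ch x : Int)
    (hs : s.toList = a :: b :: rest) :
    altScoreStep L (some x) (s, ch) = some (x + pvDelta L (s, ch)) := by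
  rcases lt_trichotomy ch 4 with h | h | h
  · have hngt : ¬ (4:Int) < ch := by omega
    have habs : |ch - 4| = 4 - ch := by rw [abs_of_neg (by omega)]; ring
    by_cases hl : a = L <;>
      simp [altScoreStep, PySem.Str.pyGet?, hs, pvDelta, h, hngt, habs, hl]
  · subst h; simp [altScoreStep, pvDelta]
  · have hnlt : ¬ ch < (4:Int) := by omega
    have habs : |ch - 4| = ch - 4 := abs_of_nonneg (by omega)
    by_cases hl : b = L <;>
      simp [altScoreStep, PySem.Str.pyGet?, hs, pvDelta, h, hnlt, habs, hl]

theorem foldB (L : Char) (l : List (String × Int))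
    (hlen : ∀ p ∈ l, 2 ≤ p.1.toList.length) :
    ∀ x : Int, l.foldl (altScoreStep L) (some x) = some (x + pvNet L l) := by
  induction l with
  | nil => intro x; simp [pvNet]
  | cons p l ih =>
    intro x
    obtain ⟨s, ch⟩ := p
    obtain ⟨a, b, rest, hs⟩ : ∃ a b rest, s.toList = a :: b :: rest := by
      have h2' := hlen (s, ch) (by simp)
      match hl : s.toList with
      | a :: b :: rest => exact ⟨a, b, rest, rfl⟩
      | [] => rw [hl] at h2'; simp at h2'
      | [a] => rw [hl] at h2'; simp at h2'
    rw [List.foldl_cons, stepB L a b rest s ch x hs,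
        ih (fun q hq => hlen q (List.mem_cons_of_mem _ hq))]
    simp [pvNet, Int.add_assoc]

set_option maxHeartbeats 1000000 in
theorem stepA (a b : Char) (rest : List Char) (s : String) (ch : Int)
    (x1 x2 x3 x4 x5 x6 x7 x8 : Int)
    (hs : s.toList = a :: b :: rest)
    (h4 : ch < 4 → a ∈ pvLetters) (h5 : ch > 4 → b ∈ pvLetters) :
    solutionStep (some (mkScore x1 x2 x3 x4 x5 x6 x7 x8)) (s, ch) =
      some (mkScore (x1 + pvDelta 'R' (s, ch)) (x2 + pvDelta 'T' (s, ch))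
                    (x3 + pvDelta 'C' (s, ch)) (x4 + pvDelta 'F' (s, ch))
                    (x5 + pvDelta 'J' (s, ch)) (x6 + pvDelta 'M' (s, ch))
                    (x7 + pvDelta 'A' (s, ch)) (x8 + pvDelta 'N' (s, ch))) := by
  rcases lt_trichotomy ch 4 with h | h | h
  · have hngt : ¬ (4:Int) < ch := by omega
    have hla := h4 h
    simp only [pvLetters, List.mem_cons, List.not_mem_nil, or_false] at hla
    rcases hla with h0 | h0 | h0 | h0 | h0 | h0 | h0 | h0 <;> subst h0 <;>
      simp [solutionStep, PySem.Str.pyGet?, hs, mkScore, PySem.Dict.get?_mk_cons,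
            PySem.Dict.insert, pvDelta, h, hngt]
  · subst h
    simp [solutionStep, PySem.Str.pyGet?, hs, pvDelta]
  · have hnlt : ¬ ch < (4:Int) := by omega
    have hlb := h5 h
    simp only [pvLetters, List.mem_cons, List.not_mem_nil, or_false] at hlb
    rcases hlb with h0 | h0 | h0 | h0 | h0 | h0 | h0 | h0 <;> subst h0 <;>
      simp [solutionStep, PySem.Str.pyGet?, hs, mkScore, PySem.Dict.get?_mk_cons,
            PySem.Dict.insert, pvDelta, h, hnlt]

theorem foldA (l : List (String × Int))
    (hpre : ∀ p ∈ l, 2 ≤ p.1.toList.length ∧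
      (p.2 < 4 → p.1.toList.getD 0 ' ' ∈ pvLetters) ∧
      (p.2 > 4 → p.1.toList.getD 1 ' ' ∈ pvLetters)) :
    ∀ x1 x2 x3 x4 x5 x6 x7 x8 : Int,
      l.foldl solutionStep (some (mkScore x1 x2 x3 x4 x5 x6 x7 x8)) =
        some (mkScore (x1 + pvNet 'R' l) (x2 + pvNet 'T' l) (x3 + pvNet 'C' l)
                      (x4 + pvNet 'F' l) (x5 + pvNet 'J' l) (x6 + pvNet 'M' l)
                      (x7 + pvNet 'A' l) (x8 + pvNet 'N' l)) := by
  induction l with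
  | nil => intro x1 x2 x3 x4 x5 x6 x7 x8; simp [pvNet]
  | cons p l ih =>
    intro x1 x2 x3 x4 x5 x6 x7 x8
    obtain ⟨s, ch⟩ := p
    obtain ⟨hlen, h4, h5⟩ := hpre (s, ch) (by simp)
    obtain ⟨a, b, rest, hs⟩ : ∃ a b rest, s.toList = a :: b :: rest := by
      match hl : s.toList with
      | a :: b :: rest => exact ⟨a, b, rest, rfl⟩
      | [] => rw [hl] at hlen; simp at hlen
      | [a] => rw [hl] at hlen; simp at hlen
    simp only [hs, List.getD_cons_zero, List.getD_cons_succ] at h4 h5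
    rw [List.foldl_cons, stepA a b rest s ch x1 x2 x3 x4 x5 x6 x7 x8 hs h4 h5,
        ih (fun q hq => hpre q (List.mem_cons_of_mem _ hq))]
    simp [pvNet, Int.add_assoc]

-- ===== VERDICT (by name: the statement is the Claim_ definition above) =====
set_option maxHeartbeats 1000000 in
theorem solution_spec : Claim_equal_solution := by
  intro survey choices _ hpre
  show solution survey choices = solution_alt survey choices
  have hlen : ∀ p ∈ List.zip survey choices, 2 ≤ p.1.toList.length :=
    fun p hp => (hpre p hp).1
  have hA := foldA (List.zip survey choices) hpre 0 0 0 0 0 0 0 0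
  unfold solution solution_alt altPick altScore
  rw [show solutionScore0 = mkScore 0 0 0 0 0 0 0 0 from rfl, hA]
  simp only [List.map_cons, List.map_nil]
  rw [foldB 'R' _ hlen, foldB 'T' _ hlen, foldB 'C' _ hlen, foldB 'F' _ hlen,
      foldB 'J' _ hlen, foldB 'M' _ hlen, foldB 'A' _ hlen, foldB 'N' _ hlen]
  simp only [mkScore, PySem.Dict.getD_eq_get?_getD, PySem.Dict.get?_mk_cons]
  norm_num
  simp only [Char.reduceEq, reduceIte, Option.getD_some]
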